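-- pv_equiv track=rewrite | github.com/jeonghi/2021_Algorithm_Study | section5/교육과정설계.py | solution
-- ===== SOURCE A (Python) =====
-- def solution(curriculum, students_plans):
--     from collections import deque
--     answer = list()
--     for students_plan in students_plans:
--         dq = deque(curriculum)
--         students_plan = deque(students_plan)
--         while(students_plan and dq):
--             if students_plan.popleft() == dq[0]:
--                 dq.popleft()
--         answer.append("NO") if dq else answer.append("YES")
--     return answer
-- ===== SOURCE B (Python) =====
-- def solution(curriculum, students_plans):
--     def judge(plan):
--         pos = {}
--         for i, w in enumerate(plan):
--             pos[w] = pos.get(w, []) + [i]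
--         prev = -1
--         for c in curriculum:
--             nxt = next((i for i in pos.get(c, []) if i > prev), None)
--             if nxt is None:
--                 return "NO"
--             prev = nxt
--         return "YES"
--     return [judge(plan) for plan in students_plans]
-- ===== Notes on version B (the rewrite author's own statement) =====
-- stated objective: alternative
-- what changed: B first builds an inverted index per plan (dict word -> ascending list of its positions) and then walks the curriculum querying that index for the first position after the previous match, instead of A's deque-based scan that pops the plan element by element while peeling the curriculum's head.
import Mathlib
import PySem

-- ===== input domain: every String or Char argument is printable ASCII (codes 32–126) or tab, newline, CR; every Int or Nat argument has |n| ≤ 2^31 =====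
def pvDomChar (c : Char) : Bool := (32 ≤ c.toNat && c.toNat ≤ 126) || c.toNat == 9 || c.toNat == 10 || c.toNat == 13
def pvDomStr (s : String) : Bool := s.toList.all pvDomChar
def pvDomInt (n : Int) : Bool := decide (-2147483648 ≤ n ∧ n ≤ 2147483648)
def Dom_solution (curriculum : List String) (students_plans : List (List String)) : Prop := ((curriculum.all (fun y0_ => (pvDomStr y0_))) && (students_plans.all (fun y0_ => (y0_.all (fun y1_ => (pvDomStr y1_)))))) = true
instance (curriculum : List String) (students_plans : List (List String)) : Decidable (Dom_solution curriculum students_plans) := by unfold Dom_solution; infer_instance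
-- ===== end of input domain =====

-- B builds an inverted positions index per plan (word -> ascending index list) and walks the curriculum querying it, instead of A's deque scan; alternative algorithm, same behaviour.


-- ===== PORT A =====
-- the while loop: pop plan's head; if it equals dq's head, pop dq too; returns the remaining dq
def loopA : List String → List String → List String
  | [], dq => dq
  | _ :: _, [] => []
  | p :: ps, c :: cs => if p == c then loopA ps cs else loopA ps (c :: cs)

def solution (curriculum : List String) (students_plans : List (List String)) : List String :=
  students_plans.foldl
    (fun answer students_plan =>
      answer ++ [if (loopA students_plan curriculum).isEmpty then "YES" else "NO"]) []

-- ===== PORT B =====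
-- pos[w] = pos.get(w, []) + [i] over enumerate(plan): inverted index word -> ascending positions
def buildPos (plan : List String) : PySem.Dict String (List Int) :=
  (PySem.List.enumerate plan).foldl
    (fun d iw => d.insert iw.2 (d.getD iw.2 [] ++ [iw.1])) PySem.Dict.empty

-- next((i for i in lst if i > prev), None)
def firstGt (prev : Int) : List Int → Option Int
  | [] => none
  | i :: is => if i > prev then some i else firstGt prev is

-- the 'for c in curriculum' loop of judge, threading prev; early return "NO" -> false
def goB (pos : PySem.Dict String (List Int)) : List String → Int → Bool
  | [], _ => true
  | c :: cs, prev =>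
    match firstGt prev (pos.getD c []) with
    | none => false
    | some i => goB pos cs i

def solution_alt (curriculum : List String) (students_plans : List (List String)) : List String :=
  students_plans.map (fun plan => if goB (buildPos plan) curriculum (-1) then "YES" else "NO")

-- ===== PRECONDITION & SPEC =====
def Spec_solution (curriculum : List String) (students_plans : List (List String)) (out : List String) : Prop := out = solution_alt curriculum students_plans
instance (curriculum : List String) (students_plans : List (List String)) (out : List String) : Decidable (Spec_solution curriculum students_plans out) := by unfold Spec_solution; infer_instance

-- ===== CLAIM (what is proved, stated in full; the proofs are below) =====
def Claim_equal_solution : Prop := ∀ (curriculum : List String) (students_plans : List (List String)), Dom_solution curriculum students_plans → Spec_solution curriculum students_plans (solution curriculum students_plans)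

-- ===== LEMMAS AND PROOFS =====

-- reference greedy subsequence check (A's loop re-expressed curriculum-first)
def okG : List String → List String → Bool
  | [], _ => true
  | _ :: _, [] => false
  | c :: cs, p :: ps => if p == c then okG cs ps else okG (c :: cs) ps

-- greedy: consume plan until c is found, returning the remainder
def consume (c : String) : List String → Option (List String)
  | [] => none
  | p :: ps => if p == c then some ps else consume c ps

-- ascending 0-based positions of c in plan
def occList (c : String) : List String → List Int
  | [] => []
  | p :: ps => (if p == c then [(0 : Int)] else []) ++ (occList c ps).map (· + 1)

theorem loopA_isEmpty_eq_okG : ∀ (plan dq : List String), (loopA plan dq).isEmpty = okG dq plan := by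
  intro plan
  induction plan with
  | nil => intro dq; cases dq <;> simp [loopA, okG]
  | cons p ps ih =>
    intro dq
    cases dq with
    | nil => simp [loopA, okG]
    | cons c cs =>
      by_cases h : p == c
      · simp [loopA, okG, h, ih cs]
      · simp only [loopA, okG, h, Bool.false_eq_true, if_false]
        exact ih (c :: cs)

theorem okG_cons (c : String) (cs plan : List String) :
    okG (c :: cs) plan = match consume c plan with
      | none => false
      | some r => okG cs r := by
  induction plan with
  | nil => simp [okG, consume]
  | cons p ps ih =>
    by_cases h : p == c
    · simp [okG, consume, h]
    · simp [okG, consume, h, ih]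

theorem occList_nonneg : ∀ (plan : List String) (c : String) (x : Int), x ∈ occList c plan → 0 ≤ x := by
  intro plan
  induction plan with
  | nil => intro c x h; simp [occList] at h
  | cons p ps ih =>
    intro c x h
    simp only [occList, List.mem_append, List.mem_map] at h
    rcases h with h | ⟨y, hy, rfl⟩
    · split at h <;> simp_all
    · have := ih c y hy; omega

theorem firstGt_map_add_one (prev : Int) :
    ∀ (l : List Int), firstGt prev (l.map (· + 1)) = (firstGt (prev - 1) l).map (· + 1) := by
  intro l
  induction l with
  | nil => simp [firstGt]
  | cons i is ih =>
    by_cases h : i + 1 > prev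
    · have h' : i > prev - 1 := by omega
      simp [firstGt, h, h']
    · have h' : ¬ i > prev - 1 := by omega
      simp [firstGt, h, h', ih]

theorem firstGt_neg (prev : Int) (hprev : prev < 0) :
    ∀ (l : List Int), (∀ x ∈ l, 0 ≤ x) → firstGt prev l = l.head? := by
  intro l hl
  cases l with
  | nil => simp [firstGt]
  | cons i is =>
    have : i > prev := by have := hl i (by simp); omega
    simp [firstGt, this]

-- key correspondence: first occurrence of c after n-1 in the index vs greedy consumption of plan.drop n
theorem firstGt_occ : ∀ (plan : List String) (c : String) (n : Nat),
    (firstGt ((n : Int) - 1) (occList c plan) = none ∧ consume c (plan.drop n) = none) ∨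
    (∃ m : Nat, firstGt ((n : Int) - 1) (occList c plan) = some (m : Int) ∧
      consume c (plan.drop n) = some (plan.drop (m + 1))) := by
  intro plan
  induction plan with
  | nil => intro c n; left; simp [occList, firstGt, consume]
  | cons p ps ih =>
    intro c n
    cases n with
    | zero =>
      simp only [Nat.cast_zero, zero_sub, List.drop_zero]
      by_cases h : p == c
      · right
        exact ⟨0, by simp [occList, h, firstGt], by simp [consume, h]⟩
      · have hnn := occList_nonneg ps c
        have e1 : firstGt (-1) (occList c (p :: ps)) = (firstGt (-1) (occList c ps)).map (· + 1) := by
          simp only [occList, h, Bool.false_eq_true, if_false, List.nil_append]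
          rw [firstGt_map_add_one]
          rw [firstGt_neg (-1 - 1) (by omega) _ hnn, firstGt_neg (-1) (by omega) _ hnn]
        rcases ih c 0 with ⟨h1, h2⟩ | ⟨m, h1, h2⟩ <;>
          simp only [Nat.cast_zero, zero_sub, List.drop_zero] at h1 h2
        · left
          refine ⟨by rw [e1, h1]; rfl, by simp [consume, h, h2]⟩
        · right
          refine ⟨m + 1, ?_, ?_⟩
          · rw [e1, h1]; simp
          · simp [consume, h, h2, List.drop_succ_cons]
    | succ k =>
      have e0 : ((k + 1 : Nat) : Int) - 1 = (k : Int) := by push_cast; ring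
      rw [e0]
      have e1 : firstGt ((k : Int)) (occList c (p :: ps)) =
          (firstGt ((k : Int) - 1) (occList c ps)).map (· + 1) := by
        by_cases h : p == c
        · have hk : ¬ ((0 : Int) > (k : Int)) := by omega
          simp only [occList, h, if_true, List.singleton_append, firstGt, hk, if_false]
          rw [firstGt_map_add_one]
        · simp only [occList, h, Bool.false_eq_true, if_false, List.nil_append]
          rw [firstGt_map_add_one]
      rcases ih c k with ⟨h1, h2⟩ | ⟨m, h1, h2⟩
      · left
        refine ⟨by rw [e1, h1]; rfl, by simpa [List.drop_succ_cons] using h2⟩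
      · right
        refine ⟨m + 1, ?_, ?_⟩
        · rw [e1, h1]; simp
        · simpa [List.drop_succ_cons] using h2

-- the inverted index built by the fold is exactly occList (shifted by the enumeration start)
theorem getD_buildPos_aux :
    ∀ (plan : List String) (k : Int) (d : PySem.Dict String (List Int)) (c : String),
      ((PySem.List.enumerate plan k).foldl
          (fun d iw => d.insert iw.2 (d.getD iw.2 [] ++ [iw.1])) d).getD c []
        = d.getD c [] ++ (occList c plan).map (· + k) := by
  intro plan
  induction plan with
  | nil => intro k d c; simp [PySem.List.enumerate_nil, occList]
  | cons p ps ih =>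
    intro k d c
    rw [PySem.List.enumerate_cons]
    simp only [List.foldl_cons]
    rw [ih, PySem.Dict.getD_insert]
    have ef : (fun x : Int => x + (k + 1)) = ((fun x => x + k) ∘ fun x => x + 1) := by
      funext x; simp [Function.comp]; ring
    by_cases h : c = p
    · simp [h, occList, ef, List.map_map]
    · have hb : ¬ ((p == c) = true) := by simp only [beq_iff_eq]; exact fun hh => h hh.symm
      simp [h, occList, hb, ef, List.map_map]

theorem getD_buildPos (plan : List String) (c : String) :
    (buildPos plan).getD c [] = occList c plan := by
  unfold buildPos
  rw [getD_buildPos_aux]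
  simp

-- B's walk over the curriculum equals the greedy check on the plan's suffix
theorem goB_eq_okG (curriculum : List String) :
    ∀ (plan : List String) (n : Nat),
      goB (buildPos plan) curriculum ((n : Int) - 1) = okG curriculum (plan.drop n) := by
  induction curriculum with
  | nil => intro plan n; simp [goB, okG]
  | cons c cs ih =>
    intro plan n
    rw [okG_cons]
    simp only [goB, getD_buildPos]
    rcases firstGt_occ plan c n with ⟨h1, h2⟩ | ⟨m, h1, h2⟩
    · rw [h1, h2]
    · rw [h1, h2]
      show goB (buildPos plan) cs (m : Int) = okG cs (plan.drop (m + 1))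
      have e : (m : Int) = ((m + 1 : Nat) : Int) - 1 := by push_cast; ring
      rw [e, ih plan (m + 1)]

theorem foldl_append_map {α β : Type} (f : α → β) :
    ∀ (l : List α) (acc : List β),
      l.foldl (fun ans x => ans ++ [f x]) acc = acc ++ l.map f := by
  intro l
  induction l with
  | nil => simp
  | cons x xs ih => intro acc; simp [List.foldl, ih, List.map]

-- ===== VERDICT (by name: the statement is the Claim_ definition above) =====
theorem solution_spec : Claim_equal_solution := by
  intro curriculum students_plans _
  unfold Spec_solution solution solution_alt
  rw [foldl_append_map]
  simp only [List.nil_append]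
  congr 1
  funext plan
  rw [loopA_isEmpty_eq_okG]
  have := goB_eq_okG curriculum plan 0
  simp only [Nat.cast_zero, zero_sub, List.drop_zero] at this
  rw [this]
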